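-- pv_equiv track=rewrite | github.com/Kingsford-Group/llchic | trimming_experiments/trimming_exp_script.py | find_sd_pair_2
-- ===== SOURCE A (Python) =====
-- def find_sd_pair_2(pos_list_1,pos_list_2):
--     sd = -1
--     index_1 = 0
--     index_2 = 0
--     for i in range(len(pos_list_1)):
--         for j in range(len(pos_list_2)):
--             if(pos_list_1[i][0]==pos_list_2[j][0]):
--                 dist = abs(pos_list_1[i][1]-pos_list_2[j][1])
--                 if(sd==-1 or sd>dist):
--                     sd = dist
--                     index_1 = i
--                     index_2 = j
--     return (index_1,index_2)
-- ===== SOURCE B (Python) =====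
-- def find_sd_pair_2(pos_list_1, pos_list_2):
--     # Group pos_list_2 by key once; the inner scan over non-matching keys disappears.
--     buckets = {}
--     for j, (k, y) in enumerate(pos_list_2):
--         buckets.setdefault(k, []).append((j, y))
--     sd = -1
--     index_1 = 0
--     index_2 = 0
--     for i, (k, x) in enumerate(pos_list_1):
--         for j, y in buckets.get(k, ()):
--             dist = abs(x - y)
--             if sd == -1 or sd > dist:
--                 sd = dist
--                 index_1 = i
--                 index_2 = j
--     return (index_1, index_2)
-- ===== Notes on version B (the rewrite author's own statement) =====
-- stated objective: faster
-- what changed: B builds a dict grouping pos_list_2 by key once, then for each element of pos_list_1 scans only the bucket of its own key, so the inner pass over non-matching entries of pos_list_2 disappears; tie-breaking and the (0,0) no-match default are preserved exactly.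
import Mathlib
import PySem

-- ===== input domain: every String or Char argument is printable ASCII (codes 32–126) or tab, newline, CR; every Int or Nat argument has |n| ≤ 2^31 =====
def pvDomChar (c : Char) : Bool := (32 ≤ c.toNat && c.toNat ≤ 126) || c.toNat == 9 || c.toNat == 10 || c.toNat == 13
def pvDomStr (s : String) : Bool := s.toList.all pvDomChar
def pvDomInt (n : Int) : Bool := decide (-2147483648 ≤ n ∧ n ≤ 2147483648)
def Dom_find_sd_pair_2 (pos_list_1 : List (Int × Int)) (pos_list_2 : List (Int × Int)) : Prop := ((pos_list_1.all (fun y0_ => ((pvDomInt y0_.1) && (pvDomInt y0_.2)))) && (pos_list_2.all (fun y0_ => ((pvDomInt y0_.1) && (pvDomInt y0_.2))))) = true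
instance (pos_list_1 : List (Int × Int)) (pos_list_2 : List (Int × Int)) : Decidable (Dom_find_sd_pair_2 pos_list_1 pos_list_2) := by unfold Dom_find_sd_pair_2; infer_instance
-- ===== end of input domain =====

-- B groups pos_list_2 by key into a dict built once, so the inner scan over
-- non-matching entries of pos_list_2 disappears; identical return value everywhere.

-- ===== PORT A =====
def find_sd_pair_2 (pos_list_1 : List (Int × Int)) (pos_list_2 : List (Int × Int)) : Int × Int :=
  let st :=
    (PySem.List.pyRange 0 (pos_list_1.length : Int) 1).foldl (fun st i =>
      (PySem.List.pyRange 0 (pos_list_2.length : Int) 1).foldl (fun st j =>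
        -- i and j always in range, so pyGetD is exact for pos_list_k[·]
        let p := PySem.List.pyGetD pos_list_1 i ((0 : Int), (0 : Int))
        let q := PySem.List.pyGetD pos_list_2 j ((0 : Int), (0 : Int))
        if p.1 == q.1 then
          let dist := |p.2 - q.2|
          if st.1 == -1 || st.1 > dist then (dist, i, j) else st
        else st) st)
      ((-1 : Int), (0 : Int), (0 : Int))
  (st.2.1, st.2.2)

-- ===== PORT B =====
def find_sd_pair_2_alt (pos_list_1 : List (Int × Int)) (pos_list_2 : List (Int × Int)) : Int × Int :=
  -- buckets = {}; for j,(k,y) in enumerate(pos_list_2): buckets.setdefault(k,[]).append((j,y))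
  let buckets : PySem.Dict Int (List (Int × Int)) :=
    (PySem.List.enumerate pos_list_2).foldl
      (fun d je => d.modify je.2.1 [] (fun b => b ++ [(je.1, je.2.2)]))
      PySem.Dict.empty
  let st :=
    (PySem.List.enumerate pos_list_1).foldl (fun st ie =>
      (buckets.getD ie.2.1 []).foldl (fun st jy =>
        let dist := |ie.2.2 - jy.2|
        if st.1 == -1 || st.1 > dist then (dist, ie.1, jy.1) else st) st)
      ((-1 : Int), (0 : Int), (0 : Int))
  (st.2.1, st.2.2)

-- ===== PRECONDITION & SPEC =====
def Spec_find_sd_pair_2 (pos_list_1 : List (Int × Int)) (pos_list_2 : List (Int × Int)) (out : Int × Int) : Prop := out = find_sd_pair_2_alt pos_list_1 pos_list_2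
instance (pos_list_1 : List (Int × Int)) (pos_list_2 : List (Int × Int)) (out : Int × Int) : Decidable (Spec_find_sd_pair_2 pos_list_1 pos_list_2 out) := by unfold Spec_find_sd_pair_2; infer_instance

-- ===== CLAIM (what is proved, stated in full; the proofs are below) =====
def Claim_equal_find_sd_pair_2 : Prop := ∀ (pos_list_1 : List (Int × Int)) (pos_list_2 : List (Int × Int)), Dom_find_sd_pair_2 pos_list_1 pos_list_2 → Spec_find_sd_pair_2 pos_list_1 pos_list_2 (find_sd_pair_2 pos_list_1 pos_list_2)

-- ===== LEMMAS AND PROOFS =====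

-- B's bucket dict, named for the proofs (definitionally the dict built in find_sd_pair_2_alt)
def pvBuckets (pos_list_2 : List (Int × Int)) : PySem.Dict Int (List (Int × Int)) :=
  (PySem.List.enumerate pos_list_2).foldl
    (fun d je => d.modify je.2.1 [] (fun b => b ++ [(je.1, je.2.2)]))
    PySem.Dict.empty

-- The bucket dict at key a holds exactly the (index, coord) pairs of the
-- enumerated entries whose key is a, in order.
theorem bucket_fold_getD (ps : List (Int × (Int × Int))) (d : PySem.Dict Int (List (Int × Int))) (a : Int) :
    (ps.foldl (fun d je => d.modify je.2.1 [] (fun b => b ++ [(je.1, je.2.2)])) d).getD a []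
      = d.getD a [] ++ (ps.filter (fun p => p.2.1 == a)).map (fun p => (p.1, p.2.2)) := by
  induction ps generalizing d with
  | nil => simp
  | cons q ps ih =>
    simp only [List.foldl_cons, List.filter_cons]
    by_cases h : q.2.1 = a
    · subst h
      simp [ih, PySem.Dict.getD_modify_self]
    · rw [ih, PySem.Dict.getD_modify_of_ne _ _ _ (Ne.symm h)]
      simp [h]

theorem pvBuckets_getD (pos_list_2 : List (Int × Int)) (a : Int) :
    (pvBuckets pos_list_2).getD a []
      = ((PySem.List.enumerate pos_list_2).filter (fun p => p.2.1 == a)).map (fun p => (p.1, p.2.2)) := by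
  unfold pvBuckets
  rw [bucket_fold_getD]
  simp

-- A guarded fold over the enumerated pairs equals the plain fold over the
-- filtered-and-projected pairs (B's bucket contents).
theorem guard_fold_filter (a b i : Int) :
    ∀ (ps : List (Int × (Int × Int))) (st : Int × Int × Int),
      ps.foldl (fun st q =>
          if a == q.2.1 then
            let dist := |b - q.2.2|
            if st.1 == -1 || st.1 > dist then (dist, i, q.1) else st
          else st) st
        = ((ps.filter (fun p => p.2.1 == a)).map (fun p => (p.1, p.2.2))).foldl
            (fun st jy =>
              let dist := |b - jy.2|
              if st.1 == -1 || st.1 > dist then (dist, i, jy.1) else st) st := by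
  intro ps
  induction ps with
  | nil => intro st; simp
  | cons q ps ih =>
    intro st
    simp only [List.foldl_cons, List.filter_cons]
    by_cases h : q.2.1 = a
    · simp only [h, beq_self_eq_true, if_true, List.map_cons, List.foldl_cons]
      rw [ih]
    · have h1 : (a == q.2.1) = false := by simp [Ne.symm h]
      have h2 : (q.2.1 == a) = false := by simp [h]
      simp only [h1, h2, if_false, Bool.false_eq_true]
      rw [ih]

-- A's inner loop (for a fixed element (a, b) of pos_list_1 at index i) equals
-- B's fold over the bucket of key a.
theorem innerA_eq_bucket (a b i : Int) (pos_list_2 : List (Int × Int)) (st : Int × Int × Int) :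
    (PySem.List.pyRange 0 (pos_list_2.length : Int) 1).foldl (fun st j =>
        let q := PySem.List.pyGetD pos_list_2 j ((0 : Int), (0 : Int))
        if a == q.1 then
          let dist := |b - q.2|
          if st.1 == -1 || st.1 > dist then (dist, i, j) else st
        else st) st
      = ((pvBuckets pos_list_2).getD a []).foldl (fun st jy =>
          let dist := |b - jy.2|
          if st.1 == -1 || st.1 > dist then (dist, i, jy.1) else st) st := by
  rw [pvBuckets_getD]
  have h := guard_fold_filter a b i (PySem.List.enumerate pos_list_2) st
  rw [← h]
  rw [PySem.List.enumerate_eq_map_pyRange pos_list_2 ((0 : Int), (0 : Int)), List.foldl_map]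
  rfl

-- A's outer loop in enumerate form.
theorem outerA_enum (pos_list_1 pos_list_2 : List (Int × Int)) (st0 : Int × Int × Int) :
    (PySem.List.pyRange 0 (pos_list_1.length : Int) 1).foldl (fun st i =>
        (PySem.List.pyRange 0 (pos_list_2.length : Int) 1).foldl (fun st j =>
          let p := PySem.List.pyGetD pos_list_1 i ((0 : Int), (0 : Int))
          let q := PySem.List.pyGetD pos_list_2 j ((0 : Int), (0 : Int))
          if p.1 == q.1 then
            let dist := |p.2 - q.2|
            if st.1 == -1 || st.1 > dist then (dist, i, j) else st
          else st) st) st0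
      = (PySem.List.enumerate pos_list_1).foldl (fun st ie =>
          (PySem.List.pyRange 0 (pos_list_2.length : Int) 1).foldl (fun st j =>
            let q := PySem.List.pyGetD pos_list_2 j ((0 : Int), (0 : Int))
            if ie.2.1 == q.1 then
              let dist := |ie.2.2 - q.2|
              if st.1 == -1 || st.1 > dist then (dist, ie.1, j) else st
            else st) st) st0 := by
  rw [PySem.List.enumerate_eq_map_pyRange pos_list_1 ((0 : Int), (0 : Int)), List.foldl_map]
  rfl

theorem state_eq (pos_list_1 pos_list_2 : List (Int × Int)) :
    (PySem.List.pyRange 0 (pos_list_1.length : Int) 1).foldl (fun st i =>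
        (PySem.List.pyRange 0 (pos_list_2.length : Int) 1).foldl (fun st j =>
          let p := PySem.List.pyGetD pos_list_1 i ((0 : Int), (0 : Int))
          let q := PySem.List.pyGetD pos_list_2 j ((0 : Int), (0 : Int))
          if p.1 == q.1 then
            let dist := |p.2 - q.2|
            if st.1 == -1 || st.1 > dist then (dist, i, j) else st
          else st) st)
      ((-1 : Int), (0 : Int), (0 : Int))
      = (PySem.List.enumerate pos_list_1).foldl (fun st ie =>
          ((pvBuckets pos_list_2).getD ie.2.1 []).foldl (fun st jy =>
            let dist := |ie.2.2 - jy.2|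
            if st.1 == -1 || st.1 > dist then (dist, ie.1, jy.1) else st) st)
          ((-1 : Int), (0 : Int), (0 : Int)) := by
  rw [outerA_enum]
  have hf : (fun (st : Int × Int × Int) (ie : Int × (Int × Int)) =>
        (PySem.List.pyRange 0 (pos_list_2.length : Int) 1).foldl (fun st j =>
          let q := PySem.List.pyGetD pos_list_2 j ((0 : Int), (0 : Int))
          if ie.2.1 == q.1 then
            let dist := |ie.2.2 - q.2|
            if st.1 == -1 || st.1 > dist then (dist, ie.1, j) else st
          else st) st)
      = (fun (st : Int × Int × Int) (ie : Int × (Int × Int)) =>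
          ((pvBuckets pos_list_2).getD ie.2.1 []).foldl (fun st jy =>
            let dist := |ie.2.2 - jy.2|
            if st.1 == -1 || st.1 > dist then (dist, ie.1, jy.1) else st) st) := by
    funext st ie
    exact innerA_eq_bucket ie.2.1 ie.2.2 ie.1 pos_list_2 st
  rw [hf]

-- ===== VERDICT (by name: the statement is the Claim_ definition above) =====
theorem find_sd_pair_2_spec : Claim_equal_find_sd_pair_2 := by
  intro pos_list_1 pos_list_2 _
  unfold Spec_find_sd_pair_2
  exact congrArg (fun st : Int × Int × Int => (st.2.1, st.2.2)) (state_eq pos_list_1 pos_list_2)
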